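-- pv_equiv track=rewrite | github.com/subnuwa/Vul_Tech | main/Environment_Code_Generator.py | findCommonScope
-- ===== SOURCE A (Python) =====
-- def findCommonScope(scopes):
--     scopeList = scopes.split("/")  # get the scopes in list
--     common = scopeList[0].split("_")
--     # compare with each scope to find the common scope
--     for item in scopeList:
--         itemS = item.split("_")
--         i = 0
--         temp=[]
--         while i< len(common) and i< len(itemS):
--             if common[i] == itemS[i]:
--                 temp.append(common[i])
--             else:
--                 break
--             i+=1
--         common = temp
--     return common
-- ===== SOURCE B (Python) =====
-- def findCommonScope(scopes):
--     tokenLists = [scope.split("_") for scope in scopes.split("/")]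
--     common = []
--     for column in zip(*tokenLists):
--         if all(tok == column[0] for tok in column):
--             common.append(column[0])
--         else:
--             break
--     return common
-- ===== Notes on version B (the rewrite author's own statement) =====
-- stated objective: simpler
-- what changed: Replaces A's fold of a pairwise index-based while-loop (first scope compared once against itself, then prefix-trimmed by every scope) with a single transpose: split all scopes into token lists, zip them column by column, and keep each column whose entries all agree, stopping at the first disagreeing column.
import Mathlib
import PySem

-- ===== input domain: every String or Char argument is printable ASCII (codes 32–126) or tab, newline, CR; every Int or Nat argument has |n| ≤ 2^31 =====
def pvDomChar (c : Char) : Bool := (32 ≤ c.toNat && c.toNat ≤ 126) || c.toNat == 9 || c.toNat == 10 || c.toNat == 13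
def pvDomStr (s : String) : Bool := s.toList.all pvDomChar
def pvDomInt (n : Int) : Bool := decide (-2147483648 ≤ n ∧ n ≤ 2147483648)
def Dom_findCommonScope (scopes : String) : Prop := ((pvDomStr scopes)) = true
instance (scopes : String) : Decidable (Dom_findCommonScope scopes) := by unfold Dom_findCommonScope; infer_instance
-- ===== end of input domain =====

-- B replaces A's pairwise while-loop fold with a transpose (zip) over the token
-- lists, examining one column at a time; objective: simpler, same asymptotic cost.

-- s.split(sep): sep here is always a nonempty literal ("/" or "_"), so split? is `some`
def pySplit (s sep : String) : List String := (PySem.Str.split? s sep).getD []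

-- ===== PORT A =====
-- `while i < len(common) and i < len(itemS): if common[i]==itemS[i]: temp.append(common[i]) else: break; i+=1`
-- (indices are in range inside the loop, so getD is exact for common[i] / itemS[i])
def whileLoopA (common itemS : List String) (i : Nat) (temp : List String) : List String :=
  if _h : i < common.length ∧ i < itemS.length then
    if common.getD i "" = itemS.getD i "" then
      whileLoopA common itemS (i + 1) (temp ++ [common.getD i ""])
    else temp
  else temp
termination_by common.length - i
decreasing_by omega

def findCommonScope (scopes : String) : List String :=
  let scopeList := pySplit scopes "/"
  -- scopeList[0]: split always returns a nonempty list, so headD is exact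
  let common := pySplit (scopeList.headD "") "_"
  scopeList.foldl (fun common item => whileLoopA common (pySplit item "_") 0 []) common

-- ===== PORT B =====
-- zip(*lists): truncates at the shortest list; zip() of no lists is empty
def pyZipAll (lists : List (List String)) : List (List String) :=
  if _h : lists = [] ∨ lists.any (·.isEmpty) then []
  else (lists.map (fun l => l.headD "")) :: pyZipAll (lists.map List.tail)
termination_by (match lists with | [] => 0 | l :: _ => l.length)
decreasing_by
  rw [not_or] at _h
  obtain ⟨h1, h2⟩ := _h
  cases lists with
  | nil => exact absurd rfl h1
  | cons l ls =>
    simp only [List.any_cons, Bool.or_eq_true, not_or] at h2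
    cases l with
    | nil => simp at h2
    | cons a as => simp

-- `for column in zip(*tokenLists): if all(tok == column[0] for tok in column): common.append(column[0]) else: break`
def bLoop (cols : List (List String)) : List String :=
  match cols with
  | [] => []
  | c :: cols' =>
    match c with
    | [] => []  -- unreachable: zip never yields an empty tuple here
    | h :: _ => if c.all (· == h) then h :: bLoop cols' else []

def findCommonScope_alt (scopes : String) : List String :=
  bLoop (pyZipAll ((pySplit scopes "/").map (fun s => pySplit s "_")))

-- ===== PRECONDITION & SPEC =====
def Spec_findCommonScope (scopes : String) (out : List String) : Prop := out = findCommonScope_alt scopes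
instance (scopes : String) (out : List String) : Decidable (Spec_findCommonScope scopes out) := by unfold Spec_findCommonScope; infer_instance

-- ===== CLAIM (what is proved, stated in full; the proofs are below) =====
def Claim_equal_findCommonScope : Prop := ∀ (scopes : String), Dom_findCommonScope scopes → Spec_findCommonScope scopes (findCommonScope scopes)

-- ===== LEMMAS AND PROOFS =====

-- structural common prefix of two token lists: what A's while-loop computes
def cp : List String → List String → List String
  | a :: as, b :: bs => if a = b then a :: cp as bs else []
  | _, _ => []

theorem cp_nil_left (x : List String) : cp [] x = [] := by cases x <;> rfl

theorem cp_nil_right (x : List String) : cp x [] = [] := by cases x <;> rfl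

theorem cp_self (l : List String) : cp l l = l := by
  induction l with
  | nil => rfl
  | cons a as ih => simp [cp, ih]

theorem foldl_cp_nil (ls : List (List String)) : List.foldl cp [] ls = [] := by
  induction ls with
  | nil => rfl
  | cons l rest ih => simp only [List.foldl_cons, cp_nil_left, ih]

-- A's while-loop is the structural common prefix of the two drops
theorem whileA_cp (common itemS : List String) (i : Nat) (temp : List String) :
    whileLoopA common itemS i temp = temp ++ cp (common.drop i) (itemS.drop i) := by
  induction i, temp using whileLoopA.induct (common := common) (itemS := itemS) with
  | case1 i temp h heq ih =>
    rw [whileLoopA, dif_pos h, if_pos heq, ih]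
    rw [List.drop_eq_getElem_cons h.1, List.drop_eq_getElem_cons h.2]
    have h1 : common.getD i "" = common[i] := List.getD_eq_getElem common "" h.1
    have h2 : itemS.getD i "" = itemS[i] := List.getD_eq_getElem itemS "" h.2
    rw [h1, h2] at heq
    simp [cp, ← heq, ← h1]
  | case2 i temp h heq =>
    rw [whileLoopA, dif_pos h, if_neg heq]
    rw [List.drop_eq_getElem_cons h.1, List.drop_eq_getElem_cons h.2]
    have h1 : common.getD i "" = common[i] := List.getD_eq_getElem common "" h.1
    have h2 : itemS.getD i "" = itemS[i] := List.getD_eq_getElem itemS "" h.2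
    rw [h1, h2] at heq
    simp [cp, heq]
  | case3 i temp h =>
    rw [whileLoopA, dif_neg h]
    rcases Nat.lt_or_ge i common.length with hc | hc
    · have hle : itemS.length ≤ i := by omega
      rw [List.drop_eq_nil_of_le hle, cp_nil_right, List.append_nil]
    · rw [List.drop_eq_nil_of_le hc, cp_nil_left, List.append_nil]

theorem foldl_heads (a : String) (as : List String) (ls : List (List String))
    (h : ∀ l ∈ ls, l.head? = some a) :
    List.foldl cp (a :: as) ls = a :: List.foldl cp as (ls.map List.tail) := by
  induction ls generalizing as with
  | nil => rfl
  | cons l rest ih =>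
    have hl := h l (List.mem_cons_self ..)
    cases l with
    | nil => simp at hl
    | cons b t =>
      simp only [List.head?_cons, Option.some.injEq] at hl
      subst hl
      simp only [List.foldl_cons, List.map_cons, List.tail_cons, cp, if_pos]
      exact ih (cp as t) (fun l hml => h l (List.mem_cons_of_mem _ hml))

theorem foldl_bad (a : String) (as : List String) (ls : List (List String))
    (h : ∃ l ∈ ls, l.head? ≠ some a) :
    List.foldl cp (a :: as) ls = [] := by
  induction ls generalizing as with
  | nil => simp at h
  | cons l rest ih =>
    by_cases hl : l.head? = some a
    · cases l with
      | nil => simp at hl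
      | cons b t =>
        simp only [List.head?_cons, Option.some.injEq] at hl
        subst hl
        simp only [List.foldl_cons, cp, if_pos]
        apply ih
        rcases h with ⟨w, hw, hwne⟩
        rcases List.mem_cons.mp hw with h1 | h1
        · subst h1; simp at hwne
        · exact ⟨w, h1, hwne⟩
    · simp only [List.foldl_cons]
      have hcpl : cp (a :: as) l = [] := by
        cases l with
        | nil => exact cp_nil_right _
        | cons b t =>
          simp only [List.head?_cons, Option.some.injEq] at hl
          have hba : ¬ a = b := fun h' => hl h'.symm
          simp [cp, hba]
      rw [hcpl, foldl_cp_nil]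

-- B's column scan over zip(*(h0 :: ls)) is the fold of the pairwise common prefix
theorem bLoop_zipAll (h0 : List String) (ls : List (List String)) :
    bLoop (pyZipAll (h0 :: ls)) = List.foldl cp h0 ls := by
  induction h0 generalizing ls with
  | nil =>
    rw [pyZipAll, dif_pos (Or.inr (by simp))]
    rw [foldl_cp_nil]; rfl
  | cons a as ih =>
    by_cases hall : ∀ l ∈ ls, l.head? = some a
    · have hcond : ¬(((a :: as) :: ls) = [] ∨ (((a :: as) :: ls).any (·.isEmpty)) = true) := by
        rw [not_or]
        refine ⟨by simp, ?_⟩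
        simp only [Bool.not_eq_true, List.any_eq_false, List.mem_cons]
        rintro l (rfl | hml)
        · simp
        · have := hall l hml
          cases l with
          | nil => simp at this
          | cons _ _ => simp
      rw [pyZipAll, dif_neg hcond]
      have hcol : ((a :: as) :: ls).map (fun l => l.headD "") = a :: ls.map (fun l => l.headD "") := by
        simp
      rw [hcol]
      have hallbeq : ((a :: ls.map (fun l => l.headD "")).all (· == a)) = true := by
        simp only [List.all_cons, List.all_map, beq_self_eq_true, Bool.true_and, List.all_eq_true]
        intro l hml
        have := hall l hml
        cases l with
        | nil => simp at this
        | cons b t =>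
          simp only [List.head?_cons, Option.some.injEq] at this
          simp [this]
      show (if (a :: ls.map (fun l => l.headD "")).all (· == a) = true then
              a :: bLoop (pyZipAll (((a :: as) :: ls).map List.tail)) else []) = _
      rw [if_pos hallbeq]
      simp only [List.map_cons, List.tail_cons]
      rw [ih (ls.map List.tail), foldl_heads a as ls hall]
    · rw [not_forall] at hall
      have hall' : ∃ l ∈ ls, l.head? ≠ some a := by
        obtain ⟨l, hl⟩ := hall
        rw [Classical.not_imp] at hl
        exact ⟨l, hl.1, hl.2⟩
      rw [foldl_bad a as ls hall']
      by_cases hemp : ls.any (·.isEmpty) = true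
      · rw [pyZipAll, dif_pos (Or.inr (by simp [List.any_cons, hemp]))]
        rfl
      · have hcond : ¬(((a :: as) :: ls) = [] ∨ (((a :: as) :: ls).any (·.isEmpty)) = true) := by
          rw [not_or]
          exact ⟨by simp, by simp only [List.any_cons, List.isEmpty_cons, Bool.false_or]; simpa using hemp⟩
        rw [pyZipAll, dif_neg hcond]
        rcases hall' with ⟨w, hw, hwne⟩
        have hwne' : w ≠ [] := by
          intro h'
          subst h'
          have hf := List.any_eq_false.mp (Bool.of_not_eq_true hemp) [] hw
          simp at hf
        obtain ⟨b, t, rfl⟩ := List.exists_cons_of_ne_nil hwne'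
        simp only [List.head?_cons] at hwne
        have hcol : ((a :: as) :: ls).map (fun l => l.headD "") = a :: ls.map (fun l => l.headD "") := by simp
        rw [hcol]
        have hfail : ((a :: ls.map (fun l => l.headD "")).all (· == a)) = false := by
          simp only [List.all_eq_false]
          refine ⟨(b :: t).headD "", List.mem_cons_of_mem _ (List.mem_map_of_mem hw), ?_⟩
          simp only [List.headD_cons]
          have hba : ¬ b = a := fun h' => hwne (by rw [h'])
          simp [hba]
        show (if (a :: ls.map (fun l => l.headD "")).all (· == a) = true then
                a :: bLoop (pyZipAll (((a :: as) :: ls).map List.tail)) else []) = _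
        rw [hfail]
        simp

theorem pySplit_ne_nil_aux (sep : List Char) (fuel : Nat) (l cur : List Char) (acc : List (List Char)) :
    PySem.Chars.splitOn.go sep fuel l cur acc ≠ [] := by
  induction fuel generalizing l cur acc with
  | zero => rw [PySem.Chars.splitOn.go.eq_def]; simp
  | succ n ih =>
    rw [PySem.Chars.splitOn.go.eq_def]
    cases l with
    | nil => simp
    | cons c rest =>
      by_cases h : sep.isPrefixOf (c :: rest) = true
      · simp only [h]; exact ih _ _ _
      · simp [h]; exact ih _ _ _

theorem pySplit_ne_nil (s sep : String) (hsep : sep.toList ≠ []) : pySplit s sep ≠ [] := by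
  unfold pySplit PySem.Str.split? PySem.Chars.split?
  rw [if_neg (by simpa using hsep)]
  unfold PySem.Chars.splitOn
  simp only [Option.map_some, Option.getD_some, ne_eq, List.map_eq_nil_iff]
  exact pySplit_ne_nil_aux _ _ _ _ _

-- ===== VERDICT (by name: the statement is the Claim_ definition above) =====
theorem findCommonScope_spec : Claim_equal_findCommonScope := by
  intro scopes _
  unfold Spec_findCommonScope findCommonScope findCommonScope_alt
  have hne : pySplit scopes "/" ≠ [] := pySplit_ne_nil scopes "/" (by decide)
  obtain ⟨l0, rest, heq⟩ := List.exists_cons_of_ne_nil hne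
  rw [heq]
  have hstep : (fun common item => whileLoopA common (pySplit item "_") 0 []) =
      fun c item => cp c (pySplit item "_") := by
    funext c it
    rw [whileA_cp]
    simp
  rw [hstep, List.map_cons, bLoop_zipAll]
  simp only [List.headD_cons, List.foldl_cons, cp_self]
  rw [← List.foldl_map (f := fun s => pySplit s "_") (g := cp)]
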